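-- pv_equiv track=rewrite | github.com/sysucsai/Astar | display.py | cantor_decode
-- ===== SOURCE A (Python) =====
-- import math
--
-- fac = tuple([math.factorial(i) for i in range(10)])
--
-- def cantor_decode(cantor):
--     tmp_list = []
--     take_list = [i for i in range(9)]
--     remain = cantor
--     for i in range(9):
--         _fac = fac[8 - i]
--         n = remain // _fac
--         remain = remain % _fac
--         tmp_list.append(take_list[n])
--         take_list.remove(take_list[n])
--     return tmp_list
-- ===== SOURCE B (Python) =====
-- import math
--
-- fac = tuple([math.factorial(i) for i in range(10)])
--
-- def cantor_decode(cantor):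
--     r = cantor % fac[9]
--     used = [False] * 9
--     out = []
--     for k in range(8, -1, -1):
--         d = (r // fac[k]) % (k + 1)
--         for v, u in enumerate(used):
--             if not u:
--                 if d == 0:
--                     break
--                 d -= 1
--         used[v] = True
--         out.append(v)
--     return out
-- ===== Notes on version B (the rewrite author's own statement) =====
-- stated objective: alternative
-- what changed: B replaces A's shrinking take_list (index + remove) and threaded remainder with a fixed boolean used-array: each mixed-radix digit is computed independently by the closed form (r // fac[k]) % (k+1) after a single reduction r = cantor % 9!, and the element is found by scanning the used-array counting unused slots.
import Mathlib
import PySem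

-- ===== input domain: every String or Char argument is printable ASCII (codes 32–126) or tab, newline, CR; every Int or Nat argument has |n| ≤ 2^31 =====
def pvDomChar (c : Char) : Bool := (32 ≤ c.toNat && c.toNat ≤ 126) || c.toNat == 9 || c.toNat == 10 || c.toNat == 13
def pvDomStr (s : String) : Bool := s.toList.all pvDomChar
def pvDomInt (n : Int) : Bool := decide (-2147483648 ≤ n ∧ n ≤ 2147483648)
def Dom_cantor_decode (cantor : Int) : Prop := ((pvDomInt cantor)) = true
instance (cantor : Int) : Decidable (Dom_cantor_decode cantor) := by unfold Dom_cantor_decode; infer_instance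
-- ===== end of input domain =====

-- B keeps a fixed boolean used-array and finds each element by a counting scan over it, with
-- digits obtained independently by (r // fac[k]) % (k+1) after one reduction r = cantor % 9!,
-- instead of A's shrinking take_list with threaded remainder and get+remove (objective: alternative).

-- ===== PORT A =====
-- module constant: fac = tuple(math.factorial(i) for i in range(10))
def pvFac : List Int := [1, 1, 2, 6, 24, 120, 720, 5040, 40320, 362880]

-- one iteration of A's for-loop; state = (tmp_list, take_list, remain)
def pvStepA (st : List Int × List Int × Int) (i : Int) : List Int × List Int × Int :=
  let f := PySem.List.pyGetD pvFac (8 - i) 0   -- fac[8-i]; 8-i is always in [0,8]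
  let n := PySem.Int.floordiv st.2.2 f
  let remain := PySem.Int.mod st.2.2 f
  match PySem.List.pyGet? st.2.1 n with
  | some x => (st.1 ++ [x], ((PySem.List.remove? st.2.1 x).getD st.2.1, remain))
  | none => (st.1, (st.2.1, remain))   -- IndexError in Python; excluded by Pre_

def cantor_decode (cantor : Int) : List Int :=
  ((PySem.List.pyRange 0 9 1).foldl pvStepA
    ([], ((PySem.List.pyRange 0 9 1).map (fun i => i), cantor))).1

-- ===== PORT B =====
-- B's inner scan 'for v, u in enumerate(used): if not u: if d == 0: break; d -= 1';
-- the [] case is the loop finishing without break, leaving v at the last index (v - 1 here)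
def pvScanL : List Bool → Int → Nat → Int
  | [], _, v => (v : Int) - 1
  | u :: t, d, v =>
      if u = false then (if d = 0 then (v : Int) else pvScanL t (d - 1) (v + 1))
      else pvScanL t d (v + 1)

-- one iteration of B's outer for-loop; state = (used, out)
def pvStepB (r : Int) (st : List Bool × List Int) (k : Int) : List Bool × List Int :=
  let d := PySem.Int.mod (PySem.Int.floordiv r (PySem.List.pyGetD pvFac k 0)) (k + 1)
  let v := pvScanL st.1 d 0
  (st.1.set v.toNat true, st.2 ++ [v])   -- used[v] = True; v is always in [0, 8] here

def cantor_decode_alt (cantor : Int) : List Int :=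
  let r := PySem.Int.mod cantor (PySem.List.pyGetD pvFac 9 0)
  ((PySem.List.pyRange 8 (-1) (-1)).foldl (pvStepB r) (List.replicate 9 false, [])).2

-- ===== PRECONDITION & SPEC =====
-- A raises IndexError (first index n = cantor // 40320 outside [-9, 8]) exactly when
-- cantor is outside [-362880, 362880); Pre_ keeps exactly the inputs where A returns.
def Pre_cantor_decode (cantor : Int) : Prop := -362880 ≤ cantor ∧ cantor < 362880
instance (cantor : Int) : Decidable (Pre_cantor_decode cantor) := by unfold Pre_cantor_decode; infer_instance
def pvWitness_cantor_decode : Int := (1000)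

def Spec_cantor_decode (cantor : Int) (out : List Int) : Prop := out = cantor_decode_alt cantor
instance (cantor : Int) (out : List Int) : Decidable (Spec_cantor_decode cantor out) := by unfold Spec_cantor_decode; infer_instance

-- ===== CLAIM (what is proved, stated in full; the proofs are below) =====
def Claim_equal_cantor_decode : Prop := ∀ (cantor : Int), Dom_cantor_decode cantor → Pre_cantor_decode cantor → Spec_cantor_decode cantor (cantor_decode cantor)

-- ===== LEMMAS AND PROOFS =====

-- positions (as Int, offset v) of the false entries of a boolean list = A's take_list
def pvFalsesAux : Nat → List Bool → List Int
  | _, [] => []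
  | v, b :: t => if b then pvFalsesAux (v + 1) t else (v : Int) :: pvFalsesAux (v + 1) t

theorem pvFalses_ge (l : List Bool) (v : Nat) : ∀ x ∈ pvFalsesAux v l, (v : Int) ≤ x := by
  induction l generalizing v with
  | nil => simp [pvFalsesAux]
  | cons b t ih =>
      intro x hx
      simp only [pvFalsesAux] at hx
      split at hx
      · have := ih (v + 1) x hx; push_cast at this ⊢; omega
      · rcases List.mem_cons.1 hx with h | h
        · omega
        · have := ih (v + 1) x h; push_cast at this ⊢; omega

theorem pvFalses_pairwise (l : List Bool) (v : Nat) : (pvFalsesAux v l).Pairwise (· < ·) := by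
  induction l generalizing v with
  | nil => simp [pvFalsesAux]
  | cons b t ih =>
      simp only [pvFalsesAux]
      split
      · exact ih (v + 1)
      · refine List.Pairwise.cons (fun x hx => ?_) (ih (v + 1))
        have := pvFalses_ge t (v + 1) x hx; push_cast at this ⊢; omega

theorem pvFalses_nodup (l : List Bool) (v : Nat) : (pvFalsesAux v l).Nodup :=
  (pvFalses_pairwise l v).imp (fun h => ne_of_lt h)

-- the scan selects the d-th unused position
theorem pvScan_sel (l : List Bool) (v : Nat) (d : Int) (hd : 0 ≤ d)
    (h : d.toNat < (pvFalsesAux v l).length) :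
    pvScanL l d v = (pvFalsesAux v l)[d.toNat] := by
  induction l generalizing v d with
  | nil => simp [pvFalsesAux] at h
  | cons b t ih =>
      by_cases hb : b = false
      · subst hb
        simp only [pvFalsesAux, if_neg (by decide : ¬ (false = true))] at h ⊢
        by_cases hd0 : d = 0
        · subst hd0; simp [pvScanL]
        · have hd1 : 1 ≤ d := by omega
          have hdt : d.toNat = (d - 1).toNat + 1 := by omega
          have hlt : (d - 1).toNat < (pvFalsesAux (v + 1) t).length := by
            simp only [List.length_cons] at h; omega
          rw [pvScanL, if_pos rfl, if_neg hd0, ih (v + 1) (d - 1) (by omega) hlt]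
          simp only [hdt, List.getElem_cons_succ]
      · have hb' : b = true := by revert hb; cases b <;> simp
        subst hb'
        simp only [pvFalsesAux] at h ⊢
        rw [pvScanL, if_neg (by decide : ¬ (true = false))]
        exact ih (v + 1) d hd h

-- marking the selected position erases position d of the unused list
theorem pvScan_set (l : List Bool) (v : Nat) (d : Int) (hd : 0 ≤ d)
    (h : d.toNat < (pvFalsesAux v l).length) :
    pvFalsesAux v (l.set ((pvScanL l d v).toNat - v) true)
      = (pvFalsesAux v l).eraseIdx d.toNat := by
  induction l generalizing v d with
  | nil => simp [pvFalsesAux] at h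
  | cons b t ih =>
      have hR : (v : Int) ≤ pvScanL (b :: t) d v := by
        rw [pvScan_sel (b :: t) v d hd h]
        exact pvFalses_ge _ _ _ (List.getElem_mem h)
      by_cases hb : b = false
      · subst hb
        simp only [pvFalsesAux, if_neg (by decide : ¬ (false = true))] at h ⊢
        by_cases hd0 : d = 0
        · subst hd0
          rw [pvScanL, if_pos rfl, if_pos rfl]
          simp [pvFalsesAux]
        · have hd1 : 1 ≤ d := by omega
          rw [pvScanL, if_pos rfl, if_neg hd0]
          have hlt : (d - 1).toNat < (pvFalsesAux (v + 1) t).length := by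
            simp only [List.length_cons] at h; omega
          have hR' : ((v : Int) + 1) ≤ pvScanL t (d - 1) (v + 1) := by
            rw [pvScan_sel t (v + 1) (d - 1) (by omega) hlt]
            have := pvFalses_ge t (v + 1) _ (List.getElem_mem hlt)
            push_cast at this ⊢; exact this
          have hidx : (pvScanL t (d - 1) (v + 1)).toNat - v
              = ((pvScanL t (d - 1) (v + 1)).toNat - (v + 1)) + 1 := by omega
          rw [hidx, List.set_cons_succ]
          have hdt : d.toNat = (d - 1).toNat + 1 := by omega
          rw [hdt]
          simp only [pvFalsesAux, if_neg (by decide : ¬ (false = true)), List.eraseIdx_cons_succ]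
          rw [ih (v + 1) (d - 1) (by omega) hlt]
      · have hb' : b = true := by revert hb; cases b <;> simp
        subst hb'
        simp only [pvFalsesAux] at h ⊢
        rw [pvScanL, if_neg (by decide : ¬ (true = false))] at hR ⊢
        have hR' : ((v : Int) + 1) ≤ pvScanL t d (v + 1) := by
          rw [pvScan_sel t (v + 1) d hd h]
          have := pvFalses_ge t (v + 1) _ (List.getElem_mem h)
          push_cast at this ⊢; exact this
        have hidx : (pvScanL t d (v + 1)).toNat - v
            = ((pvScanL t d (v + 1)).toNat - (v + 1)) + 1 := by omega
        rw [hidx, List.set_cons_succ]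
        simp only [pvFalsesAux]
        exact ih (v + 1) d hd h

-- fac[t] is t! (for the indices the loops use)
theorem pvFacLookup (t : Nat) (h : t ≤ 9) :
    PySem.List.pyGetD pvFac (t : Int) 0 = (Nat.factorial t : Int) := by
  interval_cases t <;> decide

-- the closed-form digit: (r % (b*c)) / b = (r / b) % c for nonnegative r
theorem pvKeyArith (r : Int) (hr : 0 ≤ r) (b c : Nat) :
    (r % ((b * c : Nat) : Int)) / (b : Int) = (r / (b : Int)) % (c : Int) := by
  obtain ⟨a, rfl⟩ := Int.eq_ofNat_of_zero_le hr
  rw [← Int.natCast_mod a (b * c), ← Int.natCast_div, ← Int.natCast_div, ← Int.natCast_mod]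
  exact_mod_cast Nat.mod_mul_right_div_self a b c

-- erasing the first copy of xs[n] from a nodup list is erasing position n
theorem pvEraseNodup (xs : List Int) (n : Nat) (hn : n < xs.length) (hnd : xs.Nodup) :
    xs.erase xs[n] = xs.eraseIdx n := by
  rw [← List.eraseIdx_idxOf_eq_erase, List.Nodup.idxOf_getElem hnd n hn]

-- the two loops, with t steps left and matching states, produce the same final list
theorem pvLoop (t : Nat) (ht : t ≤ 9) (out : List Int) (used : List Bool) (r : Int)
    (hlen : (pvFalsesAux 0 used).length = t) (hr0 : 0 ≤ r) :
    ((PySem.List.pyRange (9 - (t : Int)) 9 1).foldl pvStepA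
        (out, (pvFalsesAux 0 used, PySem.Int.mod r ((Nat.factorial t : Nat) : Int)))).1
    = ((PySem.List.pyRange ((t : Int) - 1) (-1) (-1)).foldl (pvStepB r) (used, out)).2 := by
  induction t generalizing out used with
  | zero =>
      rw [PySem.List.pyRange_one_eq_nil (by norm_num), PySem.List.pyRange_neg_one_eq_nil (by norm_num)]
      simp
  | succ t ih =>
      set take := pvFalsesAux 0 used with htake
      have hnd : take.Nodup := pvFalses_nodup used 0
      have hft : (0:Int) < ((Nat.factorial t : Nat) : Int) := by exact_mod_cast Nat.factorial_pos t
      have hft1 : (0:Int) < ((Nat.factorial (t+1) : Nat) : Int) := by exact_mod_cast Nat.factorial_pos (t+1)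
      have hcast : ((Nat.factorial (t+1) : Nat) : Int) = ((t:Int) + 1) * ((Nat.factorial t : Nat) : Int) := by
        push_cast [Nat.factorial_succ]; ring
      set R := PySem.Int.mod r ((Nat.factorial (t+1) : Nat) : Int) with hR
      have hR0 : 0 ≤ R := PySem.Int.mod_nonneg r hft1
      have hRlt : R < ((Nat.factorial (t+1) : Nat) : Int) := PySem.Int.mod_lt r hft1
      have hn0 : 0 ≤ PySem.Int.floordiv R ((Nat.factorial t : Nat) : Int) := by
        rw [PySem.Int.floordiv_eq_ediv_of_pos hft]
        exact Int.ediv_nonneg hR0 (le_of_lt hft)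
      have hnlt : PySem.Int.floordiv R ((Nat.factorial t : Nat) : Int) < (t:Int) + 1 := by
        rw [PySem.Int.floordiv_lt_iff_lt_mul hft, ← hcast]; exact hRlt
      set n := PySem.Int.floordiv R ((Nat.factorial t : Nat) : Int) with hn
      have hdig : PySem.Int.mod (PySem.Int.floordiv r (PySem.List.pyGetD pvFac (t:Int) 0)) ((t:Int) + 1) = n := by
        rw [pvFacLookup t (by omega)]
        rw [PySem.Int.floordiv_eq_ediv_of_pos hft,
            PySem.Int.mod_eq_emod_of_pos (by omega : (0:Int) < (t:Int) + 1)]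
        rw [hn, PySem.Int.floordiv_eq_ediv_of_pos hft, hR, PySem.Int.mod_eq_emod_of_pos hft1]
        have hk := pvKeyArith r hr0 (Nat.factorial t) (t+1)
        rw [show ((Nat.factorial t * (t+1) : Nat) : Int) = ((Nat.factorial (t+1) : Nat) : Int) by
              push_cast [Nat.factorial_succ]; ring] at hk
        rw [show (((t+1 : Nat)) : Int) = (t:Int) + 1 by push_cast; ring] at hk
        exact hk.symm
      have hnt : n.toNat < take.length := by rw [hlen]; omega
      have hget : PySem.List.pyGet? take n = some (take[n.toNat]'hnt) :=
        PySem.List.pyGet?_eq_some_getElem take hn0 (by rw [hlen]; push_cast; omega)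
      have hremove : PySem.List.remove? take (take[n.toNat]'hnt) = some (take.eraseIdx n.toNat) := by
        rw [PySem.List.remove?_eq_some_erase take _ (List.getElem_mem hnt)]
        rw [pvEraseNodup take n.toNat hnt hnd]
      have hmodR : PySem.Int.mod R ((Nat.factorial t : Nat) : Int)
          = PySem.Int.mod r ((Nat.factorial t : Nat) : Int) := by
        rw [hR, PySem.Int.mod_eq_emod_of_pos hft1, PySem.Int.mod_eq_emod_of_pos hft,
            PySem.Int.mod_eq_emod_of_pos hft]
        exact Int.emod_emod_of_dvd r (by exact_mod_cast Nat.factorial_dvd_factorial (Nat.le_succ t))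
      have hscan : pvScanL used n 0 = take[n.toNat]'hnt := by
        rw [pvScan_sel used 0 n hn0 hnt]
      have hset : pvFalsesAux 0 (used.set (take[n.toNat]'hnt).toNat true)
          = take.eraseIdx n.toNat := by
        have h := pvScan_set used 0 n hn0 hnt
        rw [hscan, Nat.sub_zero] at h
        exact h
      rw [show (9 : Int) - ((t+1 : Nat) : Int) = 8 - (t:Int) by push_cast; ring]
      rw [PySem.List.pyRange_one_cons (by omega : (8:Int) - (t:Int) < 9)]
      rw [show ((t+1 : Nat) : Int) - 1 = (t:Int) by push_cast; ring]
      rw [PySem.List.pyRange_neg_one_cons (by omega : (-1:Int) < (t:Int))]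
      simp only [List.foldl_cons]
      have hstepA : pvStepA (out, (take, R)) (8 - (t:Int))
          = (out ++ [take[n.toNat]'hnt],
             (take.eraseIdx n.toNat, PySem.Int.mod r ((Nat.factorial t : Nat) : Int))) := by
        simp only [pvStepA]
        rw [show (8:Int) - (8 - (t:Int)) = (t:Int) by ring]
        rw [pvFacLookup t (by omega)]
        rw [← hn, hget]
        simp only [hremove, Option.getD_some]
        rw [hmodR]
      have hstepB : pvStepB r (used, out) (t:Int)
          = (used.set (take[n.toNat]'hnt).toNat true, out ++ [take[n.toNat]'hnt]) := by
        simp only [pvStepB]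
        rw [hdig, hscan]
      rw [hstepA, hstepB]
      rw [show (8 - (t:Int)) + 1 = 9 - (t:Int) by ring]
      have hres := ih (by omega) (out ++ [take[n.toNat]'hnt])
        (used.set (take[n.toNat]'hnt).toNat true)
        (by rw [hset, List.length_eraseIdx, if_pos hnt, hlen]; omega)
      rw [hset] at hres
      exact hres

-- the unused positions of the all-false array are 0..8
theorem pvFalsesReplicate : pvFalsesAux 0 (List.replicate 9 false) = PySem.List.pyRange 0 9 1 := by
  decide

-- nonnegative inputs: both loops run from the very top with r = cantor
theorem pvPos (c : Int) (hc : 0 ≤ c) (h2 : c < 362880) :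
    ((PySem.List.pyRange 0 9 1).foldl pvStepA
        ([], ((PySem.List.pyRange 0 9 1).map (fun i => i), c))).1
    = ((PySem.List.pyRange 8 (-1) (-1)).foldl (pvStepB c) (List.replicate 9 false, [])).2 := by
  rw [show (PySem.List.pyRange (0:Int) 9 1).map (fun i => i) = PySem.List.pyRange 0 9 1 by simp]
  have h := pvLoop 9 (le_refl 9) [] (List.replicate 9 false) c
    (by rw [pvFalsesReplicate, PySem.List.length_pyRange_one]; decide) hc
  rw [pvFalsesReplicate] at h
  rw [show ((Nat.factorial 9 : Nat) : Int) = 362880 by norm_num [Nat.factorial]] at h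
  rw [show PySem.Int.mod c 362880 = c by
        rw [PySem.Int.mod_eq_emod_of_pos (by norm_num)]; omega] at h
  norm_num at h
  exact h

-- negative inputs: A's first step wraps the negative index; after it the states match
theorem pvNegFirst (c : Int) (take : List Int) (h1 : -362880 ≤ c) (hc : c < 0)
    (htake : take = PySem.List.pyRange 0 9 1) :
    ((PySem.List.pyRange 0 9 1).foldl pvStepA ([], (take, c))).1
    = ((PySem.List.pyRange 8 (-1) (-1)).foldl (pvStepB (c + 362880)) (List.replicate 9 false, [])).2 := by
  have hq1 : -9 ≤ c / 40320 := by omega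
  have hq2 : c / 40320 ≤ -1 := by omega
  have hlen9 : take.length = 9 := by rw [htake, PySem.List.length_pyRange_one]; decide
  have hget : PySem.List.pyGet? take (c / 40320) = some (9 + c / 40320) := by
    rw [PySem.List.pyGet?_neg _ (by omega) (by rw [hlen9]; omega), hlen9, htake]
    have hidx : ((9:Nat) - (-(c / 40320)).toNat) < (PySem.List.pyRange (0:Int) 9 1).length := by
      rw [htake] at hlen9; rw [hlen9]; omega
    rw [List.getElem?_eq_getElem hidx, PySem.List.getElem_pyRange_one]
    congr 1
    omega
  have hnt : (9 + c / 40320).toNat < take.length := by rw [hlen9]; omega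
  have helem : take[(9 + c / 40320).toNat]'hnt = 9 + c / 40320 := by
    have h' : ∀ (h : (9 + c / 40320).toNat < (PySem.List.pyRange (0:Int) 9 1).length),
        (PySem.List.pyRange (0:Int) 9 1)[(9 + c / 40320).toNat]'h = 9 + c / 40320 := by
      intro h
      rw [PySem.List.getElem_pyRange_one]; omega
    subst htake
    exact h' hnt
  have hnodup : take.Nodup := by rw [htake]; exact PySem.List.nodup_pyRange_one 0 9
  have hremove : PySem.List.remove? take (9 + c / 40320)
      = some (take.eraseIdx (9 + c / 40320).toNat) := by
    have h' : PySem.List.remove? take (take[(9 + c / 40320).toNat]'hnt)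
        = some (take.eraseIdx (9 + c / 40320).toNat) := by
      rw [PySem.List.remove?_eq_some_erase _ _ (List.getElem_mem hnt),
          pvEraseNodup _ _ hnt hnodup]
    rw [helem] at h'
    exact h'
  have hscan : pvScanL (List.replicate 9 false) (9 + c / 40320) 0 = 9 + c / 40320 := by
    rw [pvScan_sel (List.replicate 9 false) 0 (9 + c / 40320) (by omega)
        (by rw [pvFalsesReplicate, ← htake, hlen9]; omega)]
    have h' : ∀ (h : (9 + c / 40320).toNat < (pvFalsesAux 0 (List.replicate 9 false)).length),
        (pvFalsesAux 0 (List.replicate 9 false))[(9 + c / 40320).toNat]'h = 9 + c / 40320 := by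
      rw [pvFalsesReplicate]
      intro h
      rw [PySem.List.getElem_pyRange_one]; omega
    exact h' _
  have hset : pvFalsesAux 0 ((List.replicate 9 false).set (9 + c / 40320).toNat true)
      = take.eraseIdx (9 + c / 40320).toNat := by
    have h := pvScan_set (List.replicate 9 false) 0 (9 + c / 40320) (by omega)
        (by rw [pvFalsesReplicate, ← htake, hlen9]; omega)
    rw [hscan, Nat.sub_zero, pvFalsesReplicate, ← htake] at h
    exact h
  rw [PySem.List.pyRange_one_cons (by norm_num : (0:Int) < 9)]
  rw [PySem.List.pyRange_neg_one_cons (by norm_num : (-1:Int) < 8)]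
  simp only [List.foldl_cons]
  have hstepA : pvStepA ([], (take, c)) 0
      = ([9 + c / 40320],
         (take.eraseIdx (9 + c / 40320).toNat, PySem.Int.mod c 40320)) := by
    simp only [pvStepA]
    rw [show (8:Int) - 0 = 8 by ring]
    rw [show PySem.List.pyGetD pvFac 8 0 = 40320 by decide]
    rw [PySem.Int.floordiv_eq_ediv_of_pos (by norm_num : (0:Int) < 40320)]
    rw [hget]
    simp only [hremove, Option.getD_some, List.nil_append]
  have hstepB : pvStepB (c + 362880) (List.replicate 9 false, []) 8
      = ((List.replicate 9 false).set (9 + c / 40320).toNat true, [9 + c / 40320]) := by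
    simp only [pvStepB]
    rw [show PySem.List.pyGetD pvFac 8 0 = 40320 by decide]
    rw [PySem.Int.floordiv_eq_ediv_of_pos (by norm_num : (0:Int) < 40320)]
    rw [show (c + 362880) / 40320 = 9 + c / 40320 by omega]
    rw [show (8:Int) + 1 = 9 by ring]
    rw [PySem.Int.mod_eq_emod_of_pos (by norm_num : (0:Int) < 9)]
    rw [Int.emod_eq_of_lt (by omega) (by omega)]
    rw [hscan]
    simp only [List.nil_append]
  rw [hstepA, hstepB]
  have h := pvLoop 8 (by omega) [9 + c / 40320]
    ((List.replicate 9 false).set (9 + c / 40320).toNat true)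
    (c + 362880)
    (by rw [hset, List.length_eraseIdx, if_pos hnt, hlen9]) (by omega)
  rw [hset] at h
  rw [show ((Nat.factorial 8 : Nat) : Int) = 40320 by norm_num [Nat.factorial]] at h
  rw [show PySem.Int.mod (c + 362880) 40320 = PySem.Int.mod c 40320 by
        rw [PySem.Int.mod_eq_emod_of_pos (by norm_num), PySem.Int.mod_eq_emod_of_pos (by norm_num)]
        omega] at h
  norm_num at h
  norm_num
  exact h

-- ===== VERDICT (by name: the statement is the Claim_ definition above) =====
theorem cantor_decode_spec : Claim_equal_cantor_decode := by
  intro c _ hP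
  obtain ⟨h1, h2⟩ := hP
  unfold Spec_cantor_decode
  show cantor_decode c = cantor_decode_alt c
  simp only [cantor_decode, cantor_decode_alt]
  rw [show PySem.List.pyGetD pvFac 9 0 = 362880 by decide]
  by_cases hc : 0 ≤ c
  · rw [show PySem.Int.mod c 362880 = c by
        rw [PySem.Int.mod_eq_emod_of_pos (by norm_num)]; omega]
    exact pvPos c hc h2
  · rw [show PySem.Int.mod c 362880 = c + 362880 by
        rw [PySem.Int.mod_eq_emod_of_pos (by norm_num)]; omega]
    rw [show (PySem.List.pyRange (0:Int) 9 1).map (fun i => i) = PySem.List.pyRange 0 9 1 by simp]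
    exact pvNegFirst c _ h1 (by omega) rfl
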